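-- pv_equiv track=rewrite | github.com/MikePfunk28/vibe-coder | ai-ide/backend/chain_of_thought_engine.py | _parse_step_response
-- ===== SOURCE A (Python) =====
-- from typing import Dict, List, Optional, Tuple, Any, AsyncGenerator
-- from enum import Enum
--
-- class CoTStepType(Enum):
--     """Types of Chain-of-Thought reasoning steps."""
--     PROBLEM_ANALYSIS = "problem_analysis"
--     DECOMPOSITION = "decomposition"
--     SOLUTION_PLANNING = "solution_planning"
--     IMPLEMENTATION = "implementation"
--     VERIFICATION = "verification"
--     REFLECTION = "reflection"
--
-- def _parse_step_response(response: str, step_type: CoTStepType) -> Tuple[str, str]: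
--     """Parse LLM response into content and reasoning."""
--     lines = response.strip().split('\n')
--
--     # Try to separate explicit reasoning from content
--     reasoning_markers = ['reasoning:', 'because:', 'rationale:', 'explanation:']
--
--     content_lines = []
--     reasoning_lines = []
--     in_reasoning = False
--
--     for line in lines:
--         line_lower = line.lower().strip()
--
--         if any(marker in line_lower for marker in reasoning_markers):
--             in_reasoning = True
--             reasoning_lines.append(line)
--         elif in_reasoning:
--             reasoning_lines.append(line)
--         else:
--             content_lines.append(line)
--
--     content = '\n'.join(content_lines).strip()
--     reasoning = '\n'.join(reasoning_lines).strip() if reasoning_lines else content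
--
--     return content, reasoning
-- ===== SOURCE B (Python) =====
-- def _parse_step_response(response, step_type):
--     """Locate the first marker line, then partition: lines before it are
--     content, lines from it on are reasoning (content doubles as reasoning
--     when no marker is present)."""
--     lines = response.strip().split('\n')
--     markers = ('reasoning:', 'because:', 'rationale:', 'explanation:')
--     idx = next((i for i, line in enumerate(lines)
--                 if any(m in line.lower().strip() for m in markers)), None)
--     if idx is None:
--         content = '\n'.join(lines).strip()
--         return content, content
--     content = '\n'.join(lines[:idx]).strip()
--     reasoning = '\n'.join(lines[idx:]).strip()
--     return content, reasoning
-- ===== Notes on version B (the rewrite author's own statement) =====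
-- stated objective: simpler
-- what changed: Replaces A's in_reasoning flag and per-line three-way dispatch with locating the index of the first marker line (enumerate/next) and slicing the line list there into content and reasoning.
import Mathlib
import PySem

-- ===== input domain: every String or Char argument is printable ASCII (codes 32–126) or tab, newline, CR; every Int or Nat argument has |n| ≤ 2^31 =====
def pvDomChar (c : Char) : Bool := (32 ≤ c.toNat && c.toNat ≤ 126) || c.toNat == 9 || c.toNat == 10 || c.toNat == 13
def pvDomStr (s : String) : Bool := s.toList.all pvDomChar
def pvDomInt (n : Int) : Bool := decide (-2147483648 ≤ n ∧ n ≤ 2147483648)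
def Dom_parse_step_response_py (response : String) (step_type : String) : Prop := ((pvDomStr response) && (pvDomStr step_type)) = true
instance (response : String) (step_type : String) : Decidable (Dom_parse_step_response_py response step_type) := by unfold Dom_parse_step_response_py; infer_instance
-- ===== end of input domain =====

-- B replaces A's in_reasoning flag loop by locating the first marker line and slicing
-- the line list there (objective: simpler decomposition, same cost).

-- ===== PORT A =====
def pvMarkers : List String := ["reasoning:", "because:", "rationale:", "explanation:"]

-- 'any(marker in line.lower().strip() for marker in reasoning_markers)'
def pvHasMarker (line : String) : Bool :=
  pvMarkers.any (fun m => PySem.Str.isIn m (PySem.Str.strip (PySem.Str.lower line)))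

-- the body of A's for-loop over the three accumulators
def pvStepA (s : List String × List String × Bool) (line : String) :
    List String × List String × Bool :=
  if pvHasMarker line then (s.1, s.2.1 ++ [line], true)
  else if s.2.2 then (s.1, s.2.1 ++ [line], s.2.2)
  else (s.1 ++ [line], s.2.1, s.2.2)

def parse_step_response_py (response : String) (step_type : String) : String × String :=
  let lines := (PySem.Str.split? (PySem.Str.strip response) "\n").getD []  -- sep "\n" ≠ "": split? is never none
  let st := lines.foldl pvStepA ([], [], false)
  let content := PySem.Str.strip (PySem.Str.join "\n" st.1)
  let reasoning := if st.2.1 ≠ [] then PySem.Str.strip (PySem.Str.join "\n" st.2.1) else content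
  (content, reasoning)

-- ===== PORT B =====
-- 'any(m in line.lower().strip() for m in markers)'
def pvMarkerLineB (line : String) : Bool :=
  (["reasoning:", "because:", "rationale:", "explanation:"]).any
    (fun m => PySem.Str.isIn m (PySem.Str.strip (PySem.Str.lower line)))

def parse_step_response_py_alt (response : String) (step_type : String) : String × String :=
  let lines := (PySem.Str.split? (PySem.Str.strip response) "\n").getD []  -- sep "\n" ≠ "": split? is never none
  match lines.findIdx? pvMarkerLineB with   -- next((i for i, line in enumerate(lines) if …), None)
  | none =>
      let content := PySem.Str.strip (PySem.Str.join "\n" lines)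
      (content, content)
  | some i =>
      (PySem.Str.strip (PySem.Str.join "\n" (lines.take i)),
       PySem.Str.strip (PySem.Str.join "\n" (lines.drop i)))

-- ===== PRECONDITION & SPEC =====
def Spec_parse_step_response_py (response : String) (step_type : String) (out : String × String) : Prop := out = parse_step_response_py_alt response step_type
instance (response : String) (step_type : String) (out : String × String) : Decidable (Spec_parse_step_response_py response step_type out) := by unfold Spec_parse_step_response_py; infer_instance

-- ===== CLAIM (what is proved, stated in full; the proofs are below) =====
def Claim_equal_parse_step_response_py : Prop := ∀ (response : String) (step_type : String), Dom_parse_step_response_py response step_type → Spec_parse_step_response_py response step_type (parse_step_response_py response step_type)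

-- ===== LEMMAS AND PROOFS =====

-- once the flag is set every remaining line is appended to reasoning_lines
theorem pvFoldA_true (lines : List String) (c r : List String) :
    lines.foldl pvStepA (c, r, true) = (c, r ++ lines, true) := by
  induction lines generalizing r with
  | nil => simp
  | cons l t ih =>
      simp only [List.foldl_cons, pvStepA]
      split <;> simp [ih]

-- A's loop from a cleared flag partitions the lines at the first marker line
theorem pvFoldA_false (lines : List String) (c r : List String) :
    lines.foldl pvStepA (c, r, false) =
      match lines.findIdx? pvHasMarker with
      | none => (c ++ lines, r, false)
      | some i => (c ++ lines.take i, r ++ lines.drop i, true) := by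
  induction lines generalizing c with
  | nil => simp
  | cons l t ih =>
      simp only [List.foldl_cons, List.findIdx?_cons]
      by_cases h : pvHasMarker l
      · simp [pvStepA, h, pvFoldA_true]
      · simp only [pvStepA, h, if_false, Bool.false_eq_true, ih (c ++ [l])]
        cases hf : t.findIdx? pvHasMarker <;> simp

theorem pvFindIdx?_lt (p : String → Bool) (l : List String) (i : Nat)
    (h : l.findIdx? p = some i) : i < l.length := by
  induction l generalizing i with
  | nil => simp at h
  | cons x t ih =>
      rw [List.findIdx?_cons] at h
      split at h
      · simp_all; omega
      · cases ht : t.findIdx? p <;> rw [ht] at h <;> simp at h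
        subst h
        have := ih _ ht; simp; omega

-- ===== VERDICT (by name: the statement is the Claim_ definition above) =====
theorem parse_step_response_py_spec : Claim_equal_parse_step_response_py := by
  intro response step_type _
  show _ = _
  unfold parse_step_response_py parse_step_response_py_alt
  have hB : pvMarkerLineB = pvHasMarker := rfl
  simp only [hB]
  set lines := (PySem.Str.split? (PySem.Str.strip response) "\n").getD []  -- sep "\n" ≠ "": split? is never none with hl
  rw [pvFoldA_false lines [] []]
  cases hf : lines.findIdx? pvHasMarker with
  | none => simp
  | some i =>
      have hi : i < lines.length := pvFindIdx?_lt _ _ _ hf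
      have hd : lines.drop i ≠ [] := by
        simp [List.drop_eq_nil_iff]; omega
      simp [hd]
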